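-- pv_equiv track=rewrite | github.com/kalebemaiaa/InvertedIndex | main.py | __ordered_insert
-- ===== SOURCE A (Python) =====
-- def __ordered_insert(num: int, lst: list[int]):
--     if not lst:
--         return [num]
--     for i, b in enumerate(lst):
--         if num == b:
--             return lst
--         elif num < b:
--             return lst[:i] + [num] + lst[i:]
--     return lst + [num]
-- ===== SOURCE B (Python) =====
-- def __ordered_insert(num: int, lst: list[int]):
--     out = []
--     placed = False
--     for b in lst:
--         if not placed:
--             if num == b:
--                 return lst
--             if num < b:
--                 out.append(num)
--                 placed = True
--         out.append(b)
--     if not placed: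
--         out.append(num)
--     return out
-- ===== Notes on version B (the rewrite author's own statement) =====
-- stated objective: alternative
-- what changed: Replaces the enumerate loop that rebuilds the result from slices lst[:i] + [num] + lst[i:] by a single pass that incrementally builds the output list with an accumulator and a 'placed' flag, never computing indices or slices.
import Mathlib
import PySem

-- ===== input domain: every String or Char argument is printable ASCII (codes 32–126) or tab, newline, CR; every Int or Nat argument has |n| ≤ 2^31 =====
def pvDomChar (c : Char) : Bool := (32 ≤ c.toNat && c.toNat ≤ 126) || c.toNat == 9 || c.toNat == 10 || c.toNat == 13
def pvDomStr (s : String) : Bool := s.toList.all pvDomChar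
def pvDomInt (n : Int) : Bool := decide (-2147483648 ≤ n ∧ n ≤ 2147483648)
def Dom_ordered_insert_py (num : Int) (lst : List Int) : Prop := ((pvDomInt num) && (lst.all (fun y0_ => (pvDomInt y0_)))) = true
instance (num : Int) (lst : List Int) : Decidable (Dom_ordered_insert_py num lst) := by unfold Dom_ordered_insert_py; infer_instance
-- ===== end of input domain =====

-- B replaces A's enumerate-and-slice loop by a single pass building the output with an accumulator and a placed flag; objective: alternative.
-- ===== PORT A =====
-- the for-loop over enumerate(lst): early returns, else fall through to the next pair
def ordered_insert_loopA (num : Int) (lst : List Int) : List (Int × Int) → List Int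
  | [] => lst ++ [num]                -- loop finished: return lst + [num]
  | (i, b) :: rest =>
    if num = b then lst
    else if num < b then
      PySem.List.slice lst none (some i) ++ [num] ++ PySem.List.slice lst (some i) none
    else ordered_insert_loopA num lst rest

def ordered_insert_py (num : Int) (lst : List Int) : List Int :=
  if lst = [] then [num]
  else ordered_insert_loopA num lst (PySem.List.enumerate lst 0)

-- ===== PORT B =====
-- the for-loop of Source B: out/placed are the loop state, early return of lst on a duplicate
def ordered_insert_loopB (num : Int) (lst : List Int) (out : List Int) (placed : Bool) :
    List Int → List Int
  | [] => if placed then out else out ++ [num]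
  | b :: rest =>
    if placed = false then
      if num = b then lst
      else if num < b then ordered_insert_loopB num lst ((out ++ [num]) ++ [b]) true rest
      else ordered_insert_loopB num lst (out ++ [b]) false rest
    else ordered_insert_loopB num lst (out ++ [b]) placed rest

def ordered_insert_py_alt (num : Int) (lst : List Int) : List Int :=
  ordered_insert_loopB num lst [] false lst

-- ===== PRECONDITION & SPEC =====
def Spec_ordered_insert_py (num : Int) (lst : List Int) (out : List Int) : Prop := out = ordered_insert_py_alt num lst
instance (num : Int) (lst : List Int) (out : List Int) : Decidable (Spec_ordered_insert_py num lst out) := by unfold Spec_ordered_insert_py; infer_instance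

-- ===== CLAIM (what is proved, stated in full; the proofs are below) =====
def Claim_equal_ordered_insert_py : Prop := ∀ (num : Int) (lst : List Int), Dom_ordered_insert_py num lst → Spec_ordered_insert_py num lst (ordered_insert_py num lst)

-- ===== LEMMAS AND PROOFS =====

-- Once 'placed' is true, B's loop only copies the remaining elements.
theorem ordered_insert_loopB_placed (num : Int) (lst out suf : List Int) :
    ordered_insert_loopB num lst out true suf = out ++ suf := by
  induction suf generalizing out with
  | nil => simp [ordered_insert_loopB]
  | cons b rest ih => simp [ordered_insert_loopB, ih]

-- Loop invariant: with pre already scanned (all of it below num), A's loop over the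
-- enumeration of the remaining suffix coincides with B's loop with accumulator pre.
theorem ordered_insert_loop_invariant (num : Int) (pre suf : List Int)
    (hpre : ∀ x ∈ pre, x < num) :
    ordered_insert_loopA num (pre ++ suf) (PySem.List.enumerate suf (pre.length : Int))
      = ordered_insert_loopB num (pre ++ suf) pre false suf := by
  induction suf generalizing pre with
  | nil => simp [PySem.List.enumerate, ordered_insert_loopA, ordered_insert_loopB]
  | cons b rest ih =>
    rw [PySem.List.enumerate_cons]
    by_cases heq : num = b
    · simp [ordered_insert_loopA, ordered_insert_loopB, heq]
    · by_cases hlt : num < b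
      · simp only [ordered_insert_loopA, ordered_insert_loopB, if_neg heq, if_pos hlt,
          PySem.List.slice_to_natCast, PySem.List.slice_from_natCast,
          List.take_left, List.drop_left]
        rw [ordered_insert_loopB_placed]
        simp
      · simp only [ordered_insert_loopA, ordered_insert_loopB, if_neg heq, if_neg hlt]
        have h1 : pre ++ b :: rest = (pre ++ [b]) ++ rest := by simp
        have h2 : ((pre.length : Int) + 1) = ((pre ++ [b]).length : Int) := by simp
        rw [h1, h2, ih (pre ++ [b]) (by
          intro x hx
          rcases List.mem_append.mp hx with h | h
          · exact hpre x h
          · simp at h; omega)]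
        simp

-- ===== VERDICT (by name: the statement is the Claim_ definition above) =====
theorem ordered_insert_py_spec : Claim_equal_ordered_insert_py := by
  intro num lst _
  unfold Spec_ordered_insert_py ordered_insert_py ordered_insert_py_alt
  by_cases h : lst = []
  · simp [h, ordered_insert_loopB]
  · rw [if_neg h]
    have := ordered_insert_loop_invariant num [] lst (by simp)
    simpa using this
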